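-- pv_equiv track=rewrite | github.com/ASSERT-KTH/Mokav | experiments/pynguin/c4b/return-lst/generated_tests/src_2560/5/src_2560.py | func
-- ===== SOURCE A (Python) =====
-- def func(*args):
-- 	ret_values = []
--
-- 	string = args[0]
-- 	AEI = 'aeiouy'
-- 	BCD = 'bcdfghjklmnpqrstvwxz'
-- 	i = (len(string) - 1)
-- 	while ((string[i].lower() not in AEI) and (string[i].lower() not in BCD)):
-- 	    i -= 1
-- 	if (string[i].lower() in AEI):
-- 	    ret_values.append('YES')
-- 	else:
-- 	    ret_values.append('NO')
--
-- 	return ret_values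
-- ===== SOURCE B (Python) =====
-- def func(*args):
--     string = args[0]
--     letters = [c for c in string if c.isalpha()]
--     last = letters[-1]
--     return ['YES' if last.lower() in 'aeiouy' else 'NO']
-- ===== Notes on version B (the rewrite author's own statement) =====
-- stated objective: simpler
-- what changed: A scans backward from the end (wrapping through negative indices) until it hits a letter; B makes one forward pass filtering out the letters and checks the last one.
import Mathlib
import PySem

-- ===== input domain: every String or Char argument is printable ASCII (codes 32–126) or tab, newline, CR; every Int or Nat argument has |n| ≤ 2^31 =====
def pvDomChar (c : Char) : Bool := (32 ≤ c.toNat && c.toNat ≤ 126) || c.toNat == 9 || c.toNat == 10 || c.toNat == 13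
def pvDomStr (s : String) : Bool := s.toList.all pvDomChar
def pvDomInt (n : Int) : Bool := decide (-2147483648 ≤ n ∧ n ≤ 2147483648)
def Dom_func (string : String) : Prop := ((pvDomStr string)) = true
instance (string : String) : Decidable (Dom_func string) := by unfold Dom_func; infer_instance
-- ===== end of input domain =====

-- B replaces A's backward wrap-around scan with one forward filter of the letters plus a last lookup;
-- equivalence of the RETURN value is proved on Pre_ (the string contains a letter; otherwise both raise IndexError).

-- ===== PORT A =====
-- while loop of A: decrement i until string[i].lower() is a letter; returns the final i
-- (none = the IndexError Python raises once i reaches -len(string)-1; the fuel 2*len+2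
-- strictly exceeds the number of iterations the Python loop can make before that raise).
def funcLoop (cs : List Char) (fuel : Nat) (i : Int) : Option Int :=
  match fuel with
  | 0 => none
  | f + 1 =>
    match PySem.List.pyGet? cs i with
    | none => none
    | some c =>
      if !(PySem.Chars.isIn (PySem.Chars.lower [c]) "aeiouy".toList) &&
         !(PySem.Chars.isIn (PySem.Chars.lower [c]) "bcdfghjklmnpqrstvwxz".toList)
      then funcLoop cs f (i - 1)
      else some i

def func (string : String) : List String :=
  match funcLoop string.toList (2 * string.toList.length + 2) (PySem.Str.len string - 1) with
  | none => []   -- A raises IndexError here; excluded by Pre_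
  | some i =>
    match PySem.List.pyGet? string.toList i with
    | none => []   -- unreachable: the loop stopped at a valid index
    | some c =>
      if PySem.Chars.isIn (PySem.Chars.lower [c]) "aeiouy".toList
      then ([] : List String) ++ ["YES"]   -- ret_values = [] then .append
      else ([] : List String) ++ ["NO"]

-- ===== PORT B =====
def func_alt (string : String) : List String :=
  match PySem.List.pyGet? (string.toList.filter (fun c => PySem.Chars.isalpha c)) (-1) with
  | none => []   -- letters[-1] raises IndexError; excluded by Pre_
  | some last =>
    [if PySem.Chars.isIn (PySem.Chars.lower [last]) "aeiouy".toList then "YES" else "NO"]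

-- ===== PRECONDITION & SPEC =====
-- Pre_ excludes exactly the strings without an ASCII letter (including ""): there A's
-- backward scan wraps around and raises IndexError (and B's letters[-1] raises too).
def Pre_func (string : String) : Prop := string.toList.any PySem.Chars.isalpha = true
instance (string : String) : Decidable (Pre_func string) := by unfold Pre_func; infer_instance
def pvWitness_func : String := "ok!"
def Spec_func (string : String) (out : List String) : Prop := out = func_alt string
instance (string : String) (out : List String) : Decidable (Spec_func string out) := by unfold Spec_func; infer_instance

-- ===== CLAIM (what is proved, stated in full; the proofs are below) =====
def Claim_equal_func : Prop := ∀ (string : String), Dom_func string → Pre_func string → Spec_func string (func string)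

-- ===== LEMMAS AND PROOFS =====
theorem char_eq_iff (a b : Char) : (a = b) ↔ a.toNat = b.toNat :=
  ⟨fun h => by rw [h], fun h => Char.ext (UInt32.toNat_inj.mp h)⟩

theorem char_le_iff (a b : Char) : (a ≤ b) ↔ a.toNat ≤ b.toNat := ⟨fun h => h, fun h => h⟩

theorem aei_toList : "aeiouy".toList = ['a','e','i','o','u','y'] := rfl

theorem bcd_toList : "bcdfghjklmnpqrstvwxz".toList =
  ['b','c','d','f','g','h','j','k','l','m','n','p','q','r','s','t','v','w','x','z'] := rfl

theorem charLit : ('A'.toNat = 65) ∧ ('Z'.toNat = 90) ∧ ('a'.toNat = 97) ∧ ('z'.toNat = 122) ∧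
    ('e'.toNat = 101) ∧ ('i'.toNat = 105) ∧ ('o'.toNat = 111) ∧ ('u'.toNat = 117) ∧
    ('y'.toNat = 121) ∧ ('b'.toNat = 98) ∧ ('c'.toNat = 99) ∧ ('d'.toNat = 100) ∧
    ('f'.toNat = 102) ∧ ('g'.toNat = 103) ∧ ('h'.toNat = 104) ∧ ('j'.toNat = 106) ∧
    ('k'.toNat = 107) ∧ ('l'.toNat = 108) ∧ ('m'.toNat = 109) ∧ ('n'.toNat = 110) ∧
    ('p'.toNat = 112) ∧ ('q'.toNat = 113) ∧ ('r'.toNat = 114) ∧ ('s'.toNat = 115) ∧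
    ('t'.toNat = 116) ∧ ('v'.toNat = 118) ∧ ('w'.toNat = 119) ∧ ('x'.toNat = 120) := by
  repeat constructor

-- A's letter test ("lower() is in the vowel string or in the consonant string") IS Python's
-- c.isalpha() on single characters.
theorem char_cond (c : Char) :
    (PySem.Chars.isIn (PySem.Chars.lower [c]) "aeiouy".toList ||
     PySem.Chars.isIn (PySem.Chars.lower [c]) "bcdfghjklmnpqrstvwxz".toList)
    = PySem.Chars.isalpha c := by
  obtain ⟨l1,l2,l3,l4,l5,l6,l7,l8,l9,l10,l11,l12,l13,l14,l15,l16,l17,l18,l19,l20,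
         l21,l22,l23,l24,l25,l26,l27,l28⟩ := charLit
  show (PySem.Chars.isIn [PySem.Chars.lowerChar c] _ || PySem.Chars.isIn [PySem.Chars.lowerChar c] _) = _
  rw [Bool.eq_iff_iff]
  simp only [Bool.or_eq_true, PySem.Chars.isIn_iff_infix, List.singleton_infix_iff]
  unfold PySem.Chars.lowerChar PySem.Chars.isalpha PySem.Chars.isupper PySem.Chars.islower
  simp only [Bool.or_eq_true, Bool.and_eq_true, decide_eq_true_eq, char_le_iff]
  split
  · rename_i hu
    have h32 : (Char.ofNat (c.toNat + 32)).toNat = c.toNat + 32 := by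
      rw [Char.toNat_ofNat]; split
      · rfl
      · rename_i hv
        have h2 : c.toNat ≤ 90 := hu.2
        exact absurd (Or.inl (by omega)) hv
    rw [aei_toList, bcd_toList]
    simp only [List.mem_cons, List.not_mem_nil, or_false, char_eq_iff, h32]
    revert hu
    rw [l1,l2,l3,l4,l5,l6,l7,l8,l9,l10,l11,l12,l13,l14,l15,l16,l17,l18,l19,l20,
        l21,l22,l23,l24,l25,l26,l27,l28]
    omega
  · rename_i hu
    rw [aei_toList, bcd_toList]
    simp only [List.mem_cons, List.not_mem_nil, or_false, char_eq_iff]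
    revert hu
    rw [l1,l2,l3,l4,l5,l6,l7,l8,l9,l10,l11,l12,l13,l14,l15,l16,l17,l18,l19,l20,
        l21,l22,l23,l24,l25,l26,l27,l28]
    omega

-- The loop invariant: started at a valid nonnegative index i whose prefix take (i+1) still
-- contains a letter, A's while loop stops at an index holding the LAST letter of that prefix.
theorem funcLoop_spec (cs : List Char) (i : Nat) (fuel : Nat) (hf : i < fuel)
    (hi : i < cs.length)
    (hl : (cs.take (i + 1)).any PySem.Chars.isalpha = true) :
    ∃ (j : Int) (c : Char), funcLoop cs fuel (i : Int) = some j ∧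
      PySem.List.pyGet? cs j = some c ∧
      ((cs.take (i + 1)).filter PySem.Chars.isalpha).getLast? = some c := by
  induction i generalizing fuel with
  | zero =>
    obtain ⟨f, rfl⟩ : ∃ f, fuel = f + 1 := ⟨fuel - 1, by omega⟩
    have hget : PySem.List.pyGet? cs ((0 : Nat) : Int) = some cs[0] :=
      PySem.List.pyGet?_ofNat cs 0 hi
    have h0 : PySem.Chars.isalpha cs[0] = true := by
      simpa [List.take_add_one, List.take_zero, List.getElem?_eq_getElem hi] using hl
    refine ⟨0, cs[0], ?_, by simpa using hget, ?_⟩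
    · simp only [funcLoop]
      simp only [hget]
      rw [← Bool.not_or, char_cond, h0]
      simp
    · simp [List.take_add_one, List.take_zero, List.getElem?_eq_getElem hi, h0]
  | succ n ih =>
    obtain ⟨f, rfl⟩ : ∃ f, fuel = f + 1 := ⟨fuel - 1, by omega⟩
    have hget : PySem.List.pyGet? cs ((n + 1 : Nat) : Int) = some cs[n + 1] :=
      PySem.List.pyGet?_ofNat cs (n + 1) hi
    have htake : cs.take (n + 1 + 1) = cs.take (n + 1) ++ [cs[n + 1]] := by
      rw [List.take_add_one, List.getElem?_eq_getElem hi]; rfl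
    by_cases ha : PySem.Chars.isalpha cs[n + 1] = true
    · refine ⟨((n + 1 : Nat) : Int), cs[n + 1], ?_, hget, ?_⟩
      · simp only [funcLoop]
        simp only [hget]
        rw [← Bool.not_or, char_cond, ha]
        simp
      · rw [htake, List.filter_append]
        simp [ha]
    · have hb : PySem.Chars.isalpha cs[n + 1] = false := by
        cases h : PySem.Chars.isalpha cs[n + 1] with
        | false => rfl
        | true => exact absurd h ha
      have hl' : (cs.take (n + 1)).any PySem.Chars.isalpha = true := by
        rw [htake, List.any_append] at hl
        simpa [hb] using hl
      obtain ⟨j, c, h1, h2, h3⟩ := ih f (by omega) (by omega) hl'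
      refine ⟨j, c, ?_, h2, ?_⟩
      · simp only [funcLoop]
        simp only [hget]
        rw [← Bool.not_or, char_cond, hb]
        simp only [Bool.not_false, if_true]
        have : ((n + 1 : Nat) : Int) - 1 = (n : Int) := by push_cast; ring
        rw [this]
        exact h1
      · rw [htake, List.filter_append]
        simpa [hb] using h3

-- ===== VERDICT (by name: the statement is the Claim_ definition above) =====
theorem func_spec : Claim_equal_func := by
  intro string _hdom hpre
  unfold Spec_func func func_alt
  have hne : string.toList ≠ [] := by
    intro h
    rw [Pre_func, h] at hpre
    simp at hpre
  have hlen : 0 < string.toList.length := List.length_pos_iff.mpr hne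
  have hlenstr : PySem.Str.len string - 1 = ((string.toList.length - 1 : Nat) : Int) := by
    rw [PySem.Str.len_eq]
    omega
  have htake : string.toList.take (string.toList.length - 1 + 1) = string.toList := by
    rw [Nat.sub_add_cancel hlen, List.take_length]
  obtain ⟨j, c, h1, h2, h3⟩ := funcLoop_spec string.toList (string.toList.length - 1)
    (2 * string.toList.length + 2) (by omega) (by omega) (by rw [htake]; exact hpre)
  rw [htake] at h3
  rw [hlenstr]
  simp only [h1, h2, PySem.List.pyGet?_neg_one, h3]
  split <;> rfl
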